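-- pv_equiv track=rewrite | github.com/katemayoneill/final-year-project | evaluation/sensitivity/sweep_savgol.py | split_runs
-- ===== SOURCE A (Python) =====
-- CONTIGUOUS_GAP      = 30    # frames
--
-- def split_runs(series, gap=CONTIGUOUS_GAP):
--     if not series:
--         return []
--     runs, current = [], [series[0]]
--     for prev, curr in zip(series, series[1:]):
--         if curr[0] - prev[0] <= gap:
--             current.append(curr)
--         else:
--             runs.append(current)
--             current = [curr]
--     runs.append(current)
--     return runs
-- ===== SOURCE B (Python) =====
-- CONTIGUOUS_GAP = 30    # frames
--
--
-- def _run_len(gap, prev, rest):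
--     # length of the longest prefix of rest that chains onto prev within gap
--     k = 0
--     for c in rest:
--         if c[0] - prev[0] > gap:
--             break
--         k += 1
--         prev = c
--     return k
--
--
-- def split_runs(series, gap=CONTIGUOUS_GAP):
--     runs = []
--     rest = list(series)
--     while rest:
--         k = 1 + _run_len(gap, rest[0], rest[1:])
--         runs.append(rest[:k])
--         rest = rest[k:]
--     return runs
-- ===== Notes on version B (the rewrite author's own statement) =====
-- stated objective: alternative
-- what changed: B chops the series run by run from the front: a helper measures the length of the maximal contiguous chain, then one slice produces the run and another the remainder, instead of A's single fold over zipped adjacent pairs with a (runs, current) accumulator.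
import Mathlib
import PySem

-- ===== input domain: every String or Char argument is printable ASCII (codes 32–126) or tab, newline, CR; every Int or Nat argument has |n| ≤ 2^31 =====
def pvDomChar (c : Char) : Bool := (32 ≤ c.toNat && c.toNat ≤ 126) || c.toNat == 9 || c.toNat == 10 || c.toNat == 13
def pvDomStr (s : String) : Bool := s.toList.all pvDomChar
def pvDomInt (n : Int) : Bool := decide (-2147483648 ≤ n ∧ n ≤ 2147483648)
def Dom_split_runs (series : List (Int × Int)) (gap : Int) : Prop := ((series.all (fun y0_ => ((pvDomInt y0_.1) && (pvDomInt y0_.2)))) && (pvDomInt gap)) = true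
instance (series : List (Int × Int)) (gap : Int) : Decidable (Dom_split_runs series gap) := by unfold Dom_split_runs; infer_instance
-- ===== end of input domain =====

-- B chops the series run by run from the front (maximal-chain length + slices)
-- instead of A's single fold over zipped adjacent pairs; alternative decomposition, same cost.


-- ===== PORT A =====
-- A: fold over zip(series, series[1:]) with accumulator (runs, current); final runs.append(current)
def split_runs (series : List (Int × Int)) (gap : Int) : List (List (Int × Int)) :=
  match series with
  | [] => []
  | s0 :: _ =>
    let st := (series.zip series.tail).foldl
      (fun (acc : List (List (Int × Int)) × List (Int × Int)) pc =>
        if pc.2.1 - pc.1.1 ≤ gap then (acc.1, acc.2 ++ [pc.2])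
        else (acc.1 ++ [acc.2], [pc.2]))
      ([], [s0])
    st.1 ++ [st.2]

-- ===== PORT B =====
-- B helper _run_len: length of the longest prefix of rest chaining onto prev within gap
def pvRunLen (gap : Int) (prev : Int × Int) : List (Int × Int) → Nat
  | [] => 0
  | c :: rest => if c.1 - prev.1 > gap then 0 else pvRunLen gap c rest + 1

-- B: while rest: take the first run as a slice, recurse on the remainder slice
def split_runs_alt (series : List (Int × Int)) (gap : Int) : List (List (Int × Int)) :=
  match series with
  | [] => []
  | x :: xs =>
    let k := 1 + pvRunLen gap x xs
    (x :: xs).take k :: split_runs_alt ((x :: xs).drop k) gap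
termination_by series.length
decreasing_by simp

-- ===== PRECONDITION & SPEC =====
def Spec_split_runs (series : List (Int × Int)) (gap : Int) (out : List (List (Int × Int))) : Prop := out = split_runs_alt series gap
instance (series : List (Int × Int)) (gap : Int) (out : List (List (Int × Int))) : Decidable (Spec_split_runs series gap out) := by unfold Spec_split_runs; infer_instance

-- ===== CLAIM (what is proved, stated in full; the proofs are below) =====
def Claim_equal_split_runs : Prop := ∀ (series : List (Int × Int)) (gap : Int), Dom_split_runs series gap → Spec_split_runs series gap (split_runs series gap)

-- ===== LEMMAS AND PROOFS =====

-- unfolding equations for the well-founded recursion of split_runs_alt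
theorem alt_nil (gap : Int) : split_runs_alt [] gap = [] := by
  rw [split_runs_alt.eq_def]

theorem alt_cons (gap : Int) (x : Int × Int) (xs : List (Int × Int)) :
    split_runs_alt (x :: xs) gap =
      (x :: xs.take (pvRunLen gap x xs)) :: split_runs_alt (xs.drop (pvRunLen gap x xs)) gap := by
  rw [split_runs_alt.eq_def]
  simp [Nat.add_comm]

-- A's loop, written as structural recursion on the tail for reasoning:
-- G gap prev cur xs = the list of runs A emits when the open run is cur, the last seen point is prev
def pvG (gap : Int) (prev : Int × Int) (cur : List (Int × Int)) : List (Int × Int) → List (List (Int × Int))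
  | [] => [cur]
  | y :: ys => if y.1 - prev.1 ≤ gap then pvG gap y (cur ++ [y]) ys else cur :: pvG gap y [y] ys

-- A's fold equals pvG (invariant, by induction generalizing the accumulator)
theorem pvFold_eq_G (gap : Int) (xs : List (Int × Int)) :
    ∀ (prev : Int × Int) (runs : List (List (Int × Int))) (cur : List (Int × Int)),
      (let st := (((prev :: xs).zip xs)).foldl
        (fun (acc : List (List (Int × Int)) × List (Int × Int)) pc =>
          if pc.2.1 - pc.1.1 ≤ gap then (acc.1, acc.2 ++ [pc.2])
          else (acc.1 ++ [acc.2], [pc.2]))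
        (runs, cur)
       st.1 ++ [st.2]) = runs ++ pvG gap prev cur xs := by
  induction xs with
  | nil => intro prev runs cur; simp [pvG]
  | cons y ys ih =>
    intro prev runs cur
    simp only [List.zip_cons_cons, List.foldl_cons, pvG]
    by_cases h : y.1 - prev.1 ≤ gap
    · simpa [h] using ih y runs (cur ++ [y])
    · simpa [h, List.append_assoc] using ih y (runs ++ [cur]) [y]

-- pvG equals B's run-slicing (induction generalizing prev and cur)
theorem pvG_eq_alt (gap : Int) (xs : List (Int × Int)) :
    ∀ (prev : Int × Int) (cur : List (Int × Int)),
      pvG gap prev cur xs =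
        (cur ++ xs.take (pvRunLen gap prev xs)) :: split_runs_alt (xs.drop (pvRunLen gap prev xs)) gap := by
  induction xs with
  | nil => intro prev cur; simp [pvG, pvRunLen, alt_nil]
  | cons y ys ih =>
    intro prev cur
    simp only [pvG, pvRunLen]
    by_cases h : y.1 - prev.1 ≤ gap
    · have h' : ¬ (y.1 - prev.1 > gap) := by omega
      simp only [h, if_pos, h', if_neg, not_false_iff]
      rw [ih y (cur ++ [y])]
      simp [List.take_succ_cons, List.drop_succ_cons]
    · have h' : y.1 - prev.1 > gap := by omega
      simp only [h, if_neg, not_false_iff, h', if_pos]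
      rw [ih y [y]]
      simp only [List.take_zero, List.drop_zero, List.append_nil]
      rw [alt_cons]
      simp

-- ===== VERDICT (by name: the statement is the Claim_ definition above) =====
theorem split_runs_spec : Claim_equal_split_runs := by
  intro series gap _
  unfold Spec_split_runs
  match series with
  | [] => simp [split_runs, alt_nil]
  | x :: xs =>
    show (let st := ((x :: xs).zip xs).foldl _ ([], [x]); st.1 ++ [st.2]) = _
    rw [pvFold_eq_G gap xs x [] [x]]
    rw [pvG_eq_alt gap xs x [x], alt_cons]
    simp
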